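-- pv_equiv track=rewrite | github.com/MatteoLacki/dooms | src/dooms/masks.py | encode_group_presence_mask
-- ===== SOURCE A (Python) =====
-- def encode_group_presence_mask(present):
--     mask = 0
--     bit = 1
--     for value in present:
--         if bool(value):
--             mask |= bit
--         bit <<= 1
--     return mask
-- ===== SOURCE B (Python) =====
-- def encode_group_presence_mask(present):
--     bits = []
--     for value in present:
--         bits.append('1' if bool(value) else '0')
--     if not bits:
--         return 0
--     bits.reverse()
--     return int(''.join(bits), 2)
-- ===== Notes on version B (the rewrite author's own statement) =====
-- stated objective: idiomatic
-- what changed: B builds a list of '1'/'0' characters, reverses it and parses it as a base-2 string with int(s, 2), instead of A's running OR-accumulator with a shifting bit.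
import Mathlib
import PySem

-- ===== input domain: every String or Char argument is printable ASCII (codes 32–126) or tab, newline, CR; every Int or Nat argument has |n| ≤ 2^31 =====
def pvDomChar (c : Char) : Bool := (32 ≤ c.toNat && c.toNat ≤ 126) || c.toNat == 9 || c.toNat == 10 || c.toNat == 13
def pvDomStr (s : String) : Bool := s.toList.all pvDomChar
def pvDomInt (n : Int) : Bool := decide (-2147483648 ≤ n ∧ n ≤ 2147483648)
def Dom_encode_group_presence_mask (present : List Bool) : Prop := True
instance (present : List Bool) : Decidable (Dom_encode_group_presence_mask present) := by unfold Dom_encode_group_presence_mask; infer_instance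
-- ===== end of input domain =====

-- B builds a list of '1'/'0' characters, reverses it and parses it base-2 (int(s,2)) instead of A's OR-accumulator with a shifting bit; same O(n) cost, more idiomatic.


-- ===== PORT A =====
-- mask = 0; bit = 1; for value in present: if value: mask |= bit; bit <<= 1; return mask
-- ('mask | bit' is PySem.Int.bor, '<<= 1' is core '<<< (1 : Nat)', both Python-exact).
def encode_group_presence_mask (present : List Bool) : Int :=
  (present.foldl (fun (s : Int × Int) value =>
      (if value then PySem.Int.bor s.1 s.2 else s.1, s.2 <<< (1 : Nat))) (0, 1)).1

-- ===== PORT B =====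
-- bits = []; append '1'/'0' per value; if empty return 0; bits.reverse();
-- int(''.join(bits), 2) is ported, exactly on these nonempty '0'/'1' strings, as the
-- standard left-to-right base-2 accumulation over the reversed character list.
def encode_group_presence_mask_alt (present : List Bool) : Int :=
  let bits := present.foldl (fun (acc : List Char) value =>
      acc ++ [if value then '1' else '0']) []
  if bits.isEmpty then 0
  else bits.reverse.foldl (fun (a : Int) c => a * 2 + (if c = '1' then 1 else 0)) 0

-- ===== PRECONDITION & SPEC =====
def Spec_encode_group_presence_mask (present : List Bool) (out : Int) : Prop := out = encode_group_presence_mask_alt present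
instance (present : List Bool) (out : Int) : Decidable (Spec_encode_group_presence_mask present out) := by unfold Spec_encode_group_presence_mask; infer_instance

-- ===== CLAIM (what is proved, stated in full; the proofs are below) =====
def Claim_equal_encode_group_presence_mask : Prop := ∀ (present : List Bool), Dom_encode_group_presence_mask present → Spec_encode_group_presence_mask present (encode_group_presence_mask present)

-- ===== LEMMAS AND PROOFS =====

-- LSB-first value of the boolean list: the common reference both loops compute.
def pvBitVal (l : List Bool) : ℕ :=
  l.foldr (fun v a => (if v then 1 else 0) + 2 * a) 0

theorem pvNatLorPow : ∀ (k m : ℕ), m < 2 ^ k → m ||| 2 ^ k = m + 2 ^ k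
  | 0, m, h => by
      have hm : m = 0 := by omega
      subst hm; decide
  | k + 1, m, h => by
      have hq : Nat.div2 m < 2 ^ k := by
        rw [Nat.div2_val]; rw [pow_succ] at h; omega
      have h2 : (2 : ℕ) ^ (k + 1) = Nat.bit false (2 ^ k) := by
        rw [Nat.bit_val]; simp [pow_succ]; ring
      calc m ||| 2 ^ (k + 1)
          = Nat.bit (Nat.bodd m) (Nat.div2 m) ||| Nat.bit false (2 ^ k) := by
            rw [Nat.bit_bodd_div2, ← h2]
        _ = Nat.bit (Nat.bodd m || false) (Nat.div2 m ||| 2 ^ k) := Nat.lor_bit _ _ _ _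
        _ = Nat.bit (Nat.bodd m) (Nat.div2 m + 2 ^ k) := by
            rw [Bool.or_false, pvNatLorPow k _ hq]
        _ = m + 2 ^ (k + 1) := by
            rw [Nat.bit_val]
            have hb := Nat.bodd_add_div2 m
            rw [pow_succ]; omega

theorem pvLor_pow (m k : ℕ) (h : m < 2 ^ k) :
    PySem.Int.bor (m : Int) ((2 : Int) ^ k) = (m : Int) + 2 ^ k := by
  have h2 : m ||| 2 ^ k = m + 2 ^ k := pvNatLorPow k m h
  have h1 : PySem.Int.bor (m : Int) (((2 ^ k : ℕ) : Int)) = ((m ||| 2 ^ k : ℕ) : Int) :=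
    PySem.Int.bor_natCast m (2 ^ k)
  have hp : ((2 : Int) ^ k) = ((2 ^ k : ℕ) : Int) := by push_cast; ring
  rw [hp, h1, h2]; push_cast; ring

theorem pvShift_one (k : ℕ) : ((2 : Int) ^ k) <<< (1 : Nat) = (2 : Int) ^ (k + 1) := by
  have : ((2 : Int) ^ k) <<< (1 : Nat) = (2 : Int) ^ k * 2 ^ 1 := by
    simpa using Int.shiftLeft_eq_mul_pow ((2 : Int) ^ k) 1
  rw [this]; ring

theorem pvA_loop (l : List Bool) (m k : ℕ) (h : m < 2 ^ k) :
    (l.foldl (fun (s : Int × Int) value =>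
        (if value then PySem.Int.bor s.1 s.2 else s.1, s.2 <<< (1 : Nat))) ((m : Int), (2 : Int) ^ k)).1
      = (m : Int) + 2 ^ k * pvBitVal l := by
  induction l generalizing m k with
  | nil => simp [pvBitVal]
  | cons v t ih =>
    simp only [List.foldl_cons]
    cases v with
    | false =>
      have hk : m < 2 ^ (k + 1) := lt_of_lt_of_le h (Nat.pow_le_pow_right (by norm_num) (Nat.le_succ k))
      have := ih m (k + 1) hk
      simp only [Bool.false_eq_true, reduceIte]
      rw [pvShift_one, this]
      simp only [pvBitVal, List.foldr, Bool.false_eq_true]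
      push_cast; ring
    | true =>
      have hm' : m + 2 ^ k < 2 ^ (k + 1) := by rw [pow_succ]; omega
      have := ih (m + 2 ^ k) (k + 1) hm'
      simp only [reduceIte]
      rw [pvShift_one, pvLor_pow m k h]
      push_cast at this
      rw [this]
      simp only [pvBitVal, List.foldr]
      push_cast; ring

theorem pvB_chars (l : List Bool) (acc : List Char) :
    l.foldl (fun (acc : List Char) value => acc ++ [if value then '1' else '0']) acc
      = acc ++ l.map (fun v => if v then '1' else '0') := by
  induction l generalizing acc with
  | nil => simp
  | cons v t ih => simp [ih]

theorem pvB_parse (l : List Bool) (a : Int) :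
    ((l.map (fun v => if v then '1' else '0')).reverse.foldl
        (fun (a : Int) c => a * 2 + (if c = '1' then 1 else 0)) a)
      = a * 2 ^ l.length + pvBitVal l := by
  induction l generalizing a with
  | nil => simp [pvBitVal]
  | cons v t ih =>
    simp only [List.map_cons, List.reverse_cons, List.foldl_append, List.foldl_cons,
      List.foldl_nil, ih, pvBitVal, List.foldr, List.length_cons]
    cases v <;> simp <;> ring

-- ===== VERDICT (by name: the statement is the Claim_ definition above) =====
theorem encode_group_presence_mask_spec : Claim_equal_encode_group_presence_mask := by
  intro present _
  unfold Spec_encode_group_presence_mask encode_group_presence_mask encode_group_presence_mask_alt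
  have hA := pvA_loop present 0 0 (by norm_num)
  norm_num at hA
  rw [hA, pvB_chars present []]
  cases present with
  | nil => simp [pvBitVal]
  | cons v t =>
    rw [List.nil_append]
    rw [if_neg (by simp)]
    rw [pvB_parse (v :: t) 0]
    simp
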